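-- pv_equiv track=rewrite | github.com/next-n/best_way_to_practice_recursion | subsequence_targetsum.py | printall
-- ===== SOURCE A (Python) =====
-- def printall(indx, temp_arr, ans_arr, s, arr, target_sum):
-- 	if indx == len(arr):
-- 		if s == target_sum:
-- 			t_arr = temp_arr.copy()
-- 			ans_arr.append(t_arr)
-- 		return ans_arr
-- 		# return
--
-- 	# add
-- 	s += arr[indx]
-- 	temp_arr.append(arr[indx])
-- 	a_arr = printall(indx + 1, temp_arr, ans_arr, s, arr, target_sum)
--
-- 	# remove
-- 	s -= arr[indx]
-- 	temp_arr.pop()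
-- 	return printall(indx + 1, temp_arr, a_arr, s, arr, target_sum)
-- ===== SOURCE B (Python) =====
-- def printall(indx, temp_arr, ans_arr, s, arr, target_sum):
--     # Build all subsequences of arr[indx:] iteratively, back-to-front,
--     # then filter by sum.  Does not mutate temp_arr/ans_arr (return value
--     # is the same as A's).
--     subsets = [[]]
--     for i in reversed(range(indx, len(arr))):
--         x = arr[i]
--         subsets = [[x] + sub for sub in subsets] + subsets
--     return list(ans_arr) + [temp_arr + sub for sub in subsets
--                             if s + sum(sub) == target_sum]
-- ===== Notes on version B (the rewrite author's own statement) =====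
-- stated objective: alternative
-- what changed: Replaces the include/exclude DFS recursion (which mutates temp_arr) with an iterative back-to-front product construction of all subsequences of arr[indx:] followed by one filtering pass; no recursion and no argument mutation.
import Mathlib
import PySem

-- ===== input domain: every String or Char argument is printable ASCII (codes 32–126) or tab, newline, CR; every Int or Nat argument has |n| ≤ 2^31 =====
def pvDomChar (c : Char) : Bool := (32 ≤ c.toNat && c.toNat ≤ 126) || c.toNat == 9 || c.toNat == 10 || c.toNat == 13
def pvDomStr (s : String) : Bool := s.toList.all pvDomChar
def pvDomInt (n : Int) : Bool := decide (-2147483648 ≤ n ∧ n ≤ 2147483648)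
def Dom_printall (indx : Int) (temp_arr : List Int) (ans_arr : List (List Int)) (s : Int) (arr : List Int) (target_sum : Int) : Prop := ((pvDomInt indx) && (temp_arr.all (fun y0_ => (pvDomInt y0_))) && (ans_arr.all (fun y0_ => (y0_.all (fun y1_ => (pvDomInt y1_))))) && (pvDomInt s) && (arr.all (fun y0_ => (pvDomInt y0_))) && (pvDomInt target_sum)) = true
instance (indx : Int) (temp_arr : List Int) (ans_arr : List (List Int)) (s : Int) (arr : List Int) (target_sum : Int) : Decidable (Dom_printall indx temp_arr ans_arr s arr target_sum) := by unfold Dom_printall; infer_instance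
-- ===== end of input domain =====

-- B replaces A's include/exclude DFS recursion by an iterative back-to-front construction
-- of all subsequences of arr[indx:] followed by one filtering pass (objective: alternative;
-- A mutates temp_arr/ans_arr in place, B does not — the equivalence is about the return value).

-- ===== PORT A =====
def printall (indx : Int) (temp_arr : List Int) (ans_arr : List (List Int)) (s : Int) (arr : List Int) (target_sum : Int) : List (List Int) :=
  if indx = (arr.length : Int) then
    if s = target_sum then ans_arr ++ [temp_arr] else ans_arr
  else
    match h : PySem.List.pyGet? arr indx with
    | none => ans_arr  -- Python raises IndexError here (arr[indx] out of range); excluded by Pre_printall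
    | some v =>
      let a_arr := printall (indx + 1) (temp_arr ++ [v]) ans_arr (s + v) arr target_sum
      printall (indx + 1) temp_arr a_arr s arr target_sum
termination_by ((arr.length : Int) - indx).toNat
decreasing_by
  all_goals
    have hin : PySem.Raise.InRange arr.length indx := by
      by_contra hc
      rw [← PySem.List.pyGet?_eq_none_iff (xs := arr)] at hc
      simp [hc] at h
    unfold PySem.Raise.InRange at hin
    omega

-- ===== PORT B =====
def printall_alt (indx : Int) (temp_arr : List Int) (ans_arr : List (List Int)) (s : Int) (arr : List Int) (target_sum : Int) : List (List Int) :=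
  let subsets := (PySem.List.pyRange indx (arr.length : Int) 1).reverse.foldl
    (fun subsets i =>
      let x := (PySem.List.pyGet? arr i).getD 0  -- default only reached when Python raises IndexError (outside Pre_printall)
      subsets.map (fun sub => x :: sub) ++ subsets)
    [[]]
  ans_arr ++ (subsets.filter (fun sub => s + sub.sum == target_sum)).map (fun sub => temp_arr ++ sub)

-- ===== PRECONDITION & SPEC =====
-- Pre_ excludes exactly the inputs on which Python A raises IndexError at arr[indx] (indx beyond ±len(arr)).
def Pre_printall (indx : Int) (temp_arr : List Int) (ans_arr : List (List Int)) (s : Int) (arr : List Int) (target_sum : Int) : Prop :=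
  -(arr.length : Int) ≤ indx ∧ indx ≤ (arr.length : Int)
instance (indx : Int) (temp_arr : List Int) (ans_arr : List (List Int)) (s : Int) (arr : List Int) (target_sum : Int) : Decidable (Pre_printall indx temp_arr ans_arr s arr target_sum) := by unfold Pre_printall; infer_instance

def pvWitness_printall : Int × List Int × List (List Int) × Int × List Int × Int := (0, [], [], 0, [1, 2], 3)

def Spec_printall (indx : Int) (temp_arr : List Int) (ans_arr : List (List Int)) (s : Int) (arr : List Int) (target_sum : Int) (out : List (List Int)) : Prop := out = printall_alt indx temp_arr ans_arr s arr target_sum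
instance (indx : Int) (temp_arr : List Int) (ans_arr : List (List Int)) (s : Int) (arr : List Int) (target_sum : Int) (out : List (List Int)) : Decidable (Spec_printall indx temp_arr ans_arr s arr target_sum out) := by unfold Spec_printall; infer_instance

-- ===== CLAIM (what is proved, stated in full; the proofs are below) =====
def Claim_equal_printall : Prop := ∀ (indx : Int) (temp_arr : List Int) (ans_arr : List (List Int)) (s : Int) (arr : List Int) (target_sum : Int), Dom_printall indx temp_arr ans_arr s arr target_sum → Pre_printall indx temp_arr ans_arr s arr target_sum → Spec_printall indx temp_arr ans_arr s arr target_sum (printall indx temp_arr ans_arr s arr target_sum)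

-- ===== LEMMAS AND PROOFS =====

-- the subsets accumulator of B's loop, as a function of the start index
def pvSubs (indx : Int) (arr : List Int) : List (List Int) :=
  (PySem.List.pyRange indx (arr.length : Int) 1).reverse.foldl
    (fun subsets i =>
      let x := (PySem.List.pyGet? arr i).getD 0
      subsets.map (fun sub => x :: sub) ++ subsets)
    [[]]

theorem printall_alt_def (indx : Int) (temp_arr : List Int) (ans_arr : List (List Int)) (s : Int) (arr : List Int) (target_sum : Int) :
    printall_alt indx temp_arr ans_arr s arr target_sum
      = ans_arr ++ ((pvSubs indx arr).filter (fun sub => s + sub.sum == target_sum)).map (fun sub => temp_arr ++ sub) := rfl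

theorem pvSubs_base (arr : List Int) : pvSubs (arr.length : Int) arr = [[]] := by
  unfold pvSubs
  rw [PySem.List.pyRange_one_eq_nil (le_refl _)]
  rfl

theorem pvSubs_step (arr : List Int) (indx : Int) (v : Int)
    (h2 : indx < (arr.length : Int)) (hv : PySem.List.pyGet? arr indx = some v) :
    pvSubs indx arr = (pvSubs (indx + 1) arr).map (fun sub => v :: sub) ++ pvSubs (indx + 1) arr := by
  unfold pvSubs
  rw [PySem.List.pyRange_one_cons h2]
  simp [List.foldl_append, hv]

theorem printall_eq (arr : List Int) (target_sum : Int) :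
    ∀ (k : Nat) (indx : Int), ((arr.length : Int) - indx).toNat = k →
      -(arr.length : Int) ≤ indx → indx ≤ (arr.length : Int) →
      ∀ (temp_arr : List Int) (ans_arr : List (List Int)) (s : Int),
        printall indx temp_arr ans_arr s arr target_sum
          = ans_arr ++ ((pvSubs indx arr).filter (fun sub => s + sub.sum == target_sum)).map (fun sub => temp_arr ++ sub) := by
  intro k
  induction k with
  | zero =>
    intro indx hk h1 h2 temp_arr ans_arr s
    have hind : indx = (arr.length : Int) := by omega
    subst hind
    rw [printall, pvSubs_base]
    by_cases hs : s = target_sum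
    · simp [hs, List.filter]
    · simp [List.filter, beq_eq_false_iff_ne.mpr hs]; exact hs
  | succ k ih =>
    intro indx hk h1 h2 temp_arr ans_arr s
    have hlt : indx < (arr.length : Int) := by omega
    have hne : ¬ indx = (arr.length : Int) := by omega
    have hin : PySem.Raise.InRange arr.length indx := by
      unfold PySem.Raise.InRange; omega
    obtain ⟨v, hv⟩ : ∃ v, PySem.List.pyGet? arr indx = some v := by
      rcases hcase : PySem.List.pyGet? arr indx with _ | v
      · rw [PySem.List.pyGet?_eq_none_iff] at hcase; exact absurd hin hcase
      · exact ⟨v, rfl⟩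
    rw [printall]
    simp only [hne, if_false]
    have hk' : ((arr.length : Int) - (indx + 1)).toNat = k := by omega
    split
    · next heq => rw [heq] at hv; exact absurd hv (by simp)
    next v' heq =>
    rw [hv] at heq; injection heq with hveq; subst hveq
    rw [ih (indx + 1) hk' (by omega) (by omega) (temp_arr ++ [v]) ans_arr (s + v),
        ih (indx + 1) hk' (by omega) (by omega) temp_arr _ s,
        pvSubs_step arr indx v hlt hv]
    rw [List.filter_append, List.filter_map, List.map_append, List.map_map, List.append_assoc]
    have hfun : ((fun sub => s + List.sum sub == target_sum) ∘ fun sub => v :: sub)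
        = fun sub => (s + v) + List.sum sub == target_sum := by
      funext sub
      simp only [Function.comp, List.sum_cons, ← add_assoc]
    have hmap : ((fun sub => temp_arr ++ sub) ∘ fun sub => v :: sub)
        = fun sub => (temp_arr ++ [v]) ++ sub := by
      funext sub; simp
    rw [hfun, hmap]

-- ===== VERDICT (by name: the statement is the Claim_ definition above) =====
theorem printall_spec : Claim_equal_printall := by
  intro indx temp_arr ans_arr s arr target_sum _ hPre
  unfold Spec_printall
  rw [printall_alt_def,
      printall_eq arr target_sum ((arr.length : Int) - indx).toNat indx rfl hPre.1 hPre.2]
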